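-- pv_equiv track=rewrite | github.com/bason1999qn/PL_Resolution | algorithms.py | is_meaningless
-- ===== SOURCE A (Python) =====
-- def is_neg(s1,s2):
--     if s1 == '-' + s2 or s2 == '-' + s1:
--         return 1
--     return 0
--
-- def is_meaningless(clause):
--     if len(clause) > 1:
--         for i in range(len(clause)):
--             for j in range(len(clause)):
--                 if (i != j):
--                     if is_neg(clause[i], clause[j]) == 1:
--                         return 1
--                     if (clause[i] ==  clause[j]):
--                         return 1
--     return 0
-- ===== SOURCE B (Python) =====
-- def is_meaningless(clause):
--     seen = set()
--     negs = set()
--     for x in clause: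
--         if x in seen or x in negs or '-' + x in seen:
--             return 1
--         seen.add(x)
--         negs.add('-' + x)
--     return 0
-- ===== Notes on version B (the rewrite author's own statement) =====
-- stated objective: simpler
-- what changed: Replaces A's all-pairs nested index scan (with an is_neg helper per pair) by a single pass that keeps two sets - literals seen so far and their negations - and reports a clash on first membership hit.
import Mathlib
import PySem

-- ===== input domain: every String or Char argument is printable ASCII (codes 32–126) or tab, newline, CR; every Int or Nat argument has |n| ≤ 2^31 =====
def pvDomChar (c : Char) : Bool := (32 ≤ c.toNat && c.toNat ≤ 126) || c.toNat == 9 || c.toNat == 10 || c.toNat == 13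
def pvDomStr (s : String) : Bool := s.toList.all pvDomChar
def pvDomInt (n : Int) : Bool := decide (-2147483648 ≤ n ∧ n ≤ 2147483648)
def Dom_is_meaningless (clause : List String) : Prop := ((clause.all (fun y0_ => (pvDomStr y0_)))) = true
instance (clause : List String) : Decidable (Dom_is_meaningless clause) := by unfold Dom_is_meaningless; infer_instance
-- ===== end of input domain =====

-- B replaces A's all-pairs nested scan by a single pass keeping two sets (literals seen so far and their negations).

-- ===== PORT A =====
def is_neg (s1 s2 : String) : Int :=
  if s1 = "-" ++ s2 ∨ s2 = "-" ++ s1 then 1 else 0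

-- inner 'for j in range(len(clause))' loop; 'some 1' models the early 'return 1'
def aInner (clause : List String) (i : Nat) : List Nat → Option Int
  | [] => none
  | j :: js =>
    if i ≠ j then
      if is_neg (clause.getD i "") (clause.getD j "") = 1 then some 1
      else if clause.getD i "" = clause.getD j "" then some 1
      else aInner clause i js
    else aInner clause i js

-- outer 'for i in range(len(clause))' loop
def aOuter (clause : List String) : List Nat → Option Int
  | [] => none
  | i :: is_ =>
    match aInner clause i (List.range clause.length) with
    | some r => some r
    | none => aOuter clause is_

def is_meaningless (clause : List String) : Int :=
  if clause.length > 1 then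
    (aOuter clause (List.range clause.length)).getD 0
  else 0

-- ===== PORT B =====
def bLoop : List String → PySem.Set String → PySem.Set String → Int
  | [], _, _ => 0
  | x :: xs, seen, negs =>
    if seen.contains x || negs.contains x || seen.contains ("-" ++ x) then 1
    else bLoop xs (seen.add x) (negs.add ("-" ++ x))

def is_meaningless_alt (clause : List String) : Int :=
  bLoop clause PySem.Set.empty PySem.Set.empty

-- ===== PRECONDITION & SPEC =====
def Spec_is_meaningless (clause : List String) (out : Int) : Prop := out = is_meaningless_alt clause
instance (clause : List String) (out : Int) : Decidable (Spec_is_meaningless clause out) := by unfold Spec_is_meaningless; infer_instance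

-- ===== CLAIM (what is proved, stated in full; the proofs are below) =====
def Claim_equal_is_meaningless : Prop := ∀ (clause : List String), Dom_is_meaningless clause → Spec_is_meaningless clause (is_meaningless clause)

-- ===== LEMMAS AND PROOFS =====

/-- The symmetric "clashing pair" relation both programs test. -/
abbrev Clash (x y : String) : Prop := x = y ∨ x = "-" ++ y ∨ y = "-" ++ x

/-- Its negation, used as a list invariant. -/
abbrev NoClash (a b : String) : Prop := ¬ Clash a b

lemma Clash_symm {x y : String} (h : Clash x y) : Clash y x := by
  unfold Clash at *; tauto

lemma is_neg_eq_one (s1 s2 : String) : is_neg s1 s2 = 1 ↔ (s1 = "-" ++ s2 ∨ s2 = "-" ++ s1) := by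
  unfold is_neg; split <;> simp_all

lemma aInner_eq (clause : List String) (i : Nat) : ∀ js : List Nat,
    aInner clause i js =
      if (∃ j ∈ js, i ≠ j ∧ Clash (clause.getD i "") (clause.getD j "")) then some 1 else none
  | [] => by simp [aInner]
  | j :: js => by
    have ih := aInner_eq clause i js
    by_cases hij : i = j
    · subst hij
      simp [aInner, ih]
    · by_cases hR : Clash (clause.getD i "") (clause.getD j "")
      · have h1 : (∃ j' ∈ j :: js, i ≠ j' ∧ Clash (clause.getD i "") (clause.getD j' "")) :=
          ⟨j, List.mem_cons_self .., hij, hR⟩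
        rw [if_pos h1]
        simp only [aInner]
        rw [if_pos hij]
        by_cases hn : is_neg (clause.getD i "") (clause.getD j "") = 1
        · rw [if_pos hn]
        · rw [if_neg hn, if_pos]
          rw [is_neg_eq_one] at hn
          unfold Clash at hR
          tauto
      · have hne : is_neg (clause.getD i "") (clause.getD j "") ≠ 1 := by
          simp only [ne_eq, is_neg_eq_one]; unfold Clash at hR; tauto
        have heq : clause.getD i "" ≠ clause.getD j "" := by
          unfold Clash at hR; tauto
        simp only [aInner, ih, hij, ne_eq, not_false_iff, if_true, if_neg hne, if_neg heq]
        congr 1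
        simp only [List.mem_cons, eq_iff_iff]
        constructor
        · rintro ⟨j', hj', h⟩; exact ⟨j', Or.inr hj', h⟩
        · rintro ⟨j', hj' | hj', h⟩
          · subst hj'; exact absurd h.2 hR
          · exact ⟨j', hj', h⟩

lemma aOuter_eq (clause : List String) : ∀ is_ : List Nat,
    aOuter clause is_ =
      if (∃ i ∈ is_, ∃ j ∈ List.range clause.length,
            i ≠ j ∧ Clash (clause.getD i "") (clause.getD j "")) then some 1 else none
  | [] => by simp [aOuter]
  | i :: is_ => by
    have ih := aOuter_eq clause is_
    rw [aOuter, aInner_eq]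
    by_cases h1 : ∃ j ∈ List.range clause.length, i ≠ j ∧ Clash (clause.getD i "") (clause.getD j "")
    · rw [if_pos h1, if_pos (⟨i, List.mem_cons_self .., h1⟩ :
        ∃ i' ∈ i :: is_, ∃ j ∈ List.range clause.length,
          i' ≠ j ∧ Clash (clause.getD i' "") (clause.getD j ""))]
    · rw [if_neg h1]
      have hcond : (∃ i' ∈ i :: is_, ∃ j ∈ List.range clause.length,
            i' ≠ j ∧ Clash (clause.getD i' "") (clause.getD j ""))
          ↔ (∃ i' ∈ is_, ∃ j ∈ List.range clause.length,
            i' ≠ j ∧ Clash (clause.getD i' "") (clause.getD j "")) := by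
        simp only [List.mem_cons]
        constructor
        · rintro ⟨i', hi' | hi', h⟩
          · subst hi'; exact absurd h h1
          · exact ⟨i', hi', h⟩
        · rintro ⟨i', hi', h⟩; exact ⟨i', Or.inr hi', h⟩
      rw [if_congr hcond rfl rfl, ih]

/-- Closed characterisation of A. -/
lemma is_meaningless_eq (clause : List String) :
    is_meaningless clause =
      if (∃ i < clause.length, ∃ j < clause.length,
            i ≠ j ∧ Clash (clause.getD i "") (clause.getD j "")) then 1 else 0 := by
  unfold is_meaningless
  rw [aOuter_eq]
  simp only [List.mem_range]
  by_cases hC : ∃ i < clause.length, ∃ j < clause.length,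
      i ≠ j ∧ Clash (clause.getD i "") (clause.getD j "")
  · have hlen : clause.length > 1 := by
      obtain ⟨i, hi, j, hj, hij, -⟩ := hC
      omega
    rw [if_pos hlen, if_pos hC, if_pos hC]
    rfl
  · rw [if_neg hC, if_neg hC]
    split <;> rfl

lemma bLoop_eq : ∀ (xs : List String) (seen negs : PySem.Set String),
    (∀ z, z ∈ negs ↔ ∃ y ∈ seen, z = "-" ++ y) →
    bLoop xs seen negs =
      if (xs.Pairwise NoClash ∧ ∀ a ∈ xs, ∀ y ∈ seen, ¬ Clash a y) then 0 else 1
  | [], seen, negs, _ => by simp [bLoop]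
  | x :: xs, seen, negs, hinv => by
    have hhit : (seen.contains x || negs.contains x || seen.contains ("-" ++ x)) = true ↔
        ∃ y ∈ seen, Clash x y := by
      simp only [Bool.or_eq_true, PySem.Set.contains, List.elem_iff, hinv x]
      constructor
      · rintro ((h | ⟨y, hy, h⟩) | h)
        · exact ⟨x, h, Or.inl rfl⟩
        · exact ⟨y, hy, Or.inr (Or.inl h)⟩
        · exact ⟨"-" ++ x, h, Or.inr (Or.inr rfl)⟩
      · rintro ⟨y, hy, h | h | h⟩
        · exact Or.inl (Or.inl (h ▸ hy))
        · exact Or.inl (Or.inr ⟨y, hy, h⟩)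
        · exact Or.inr (h ▸ hy)
    rw [bLoop]
    by_cases hh : ∃ y ∈ seen, Clash x y
    · rw [if_pos (hhit.mpr hh), if_neg]
      rintro ⟨-, hcross⟩
      obtain ⟨y, hy, hr⟩ := hh
      exact hcross x (List.mem_cons_self ..) y hy hr
    · have hinv' : ∀ z, z ∈ negs.add ("-" ++ x) ↔ ∃ y ∈ seen.add x, z = "-" ++ y := by
        intro z
        rw [PySem.Set.mem_add, hinv z]
        constructor
        · rintro (⟨y, hy, rfl⟩ | rfl)
          · exact ⟨y, (PySem.Set.mem_add ..).mpr (Or.inl hy), rfl⟩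
          · exact ⟨x, (PySem.Set.mem_add ..).mpr (Or.inr rfl), rfl⟩
        · rintro ⟨y, hy, rfl⟩
          rcases (PySem.Set.mem_add ..).mp hy with h | rfl
          · exact Or.inl ⟨y, h, rfl⟩
          · exact Or.inr rfl
      rw [if_neg (fun h => hh (hhit.mp h)), bLoop_eq xs (seen.add x) (negs.add ("-" ++ x)) hinv']
      have hh' : ∀ y ∈ seen, ¬ Clash x y := fun y hy hc => hh ⟨y, hy, hc⟩
      have hcond : (List.Pairwise NoClash xs ∧ ∀ a ∈ xs, ∀ y ∈ seen.add x, ¬ Clash a y)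
          ↔ (List.Pairwise NoClash (x :: xs) ∧ ∀ a ∈ x :: xs, ∀ y ∈ seen, ¬ Clash a y) := by
        simp only [List.pairwise_cons, List.forall_mem_cons]
        constructor
        · rintro ⟨hp, hcr⟩
          exact ⟨⟨fun b hb hc => hcr b hb x ((PySem.Set.mem_add ..).mpr (Or.inr rfl))
              (Clash_symm hc), hp⟩, hh', fun a ha y hy =>
            hcr a ha y ((PySem.Set.mem_add ..).mpr (Or.inl hy))⟩
        · rintro ⟨⟨hx, hp⟩, _, hcr⟩
          refine ⟨hp, fun a ha y hy => ?_⟩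
          rcases (PySem.Set.mem_add ..).mp hy with h | rfl
          · exact hcr a ha y h
          · exact fun hc => hx a ha (Clash_symm hc)
      rw [if_congr hcond rfl rfl]

/-- Closed characterisation of B. -/
lemma is_meaningless_alt_eq (clause : List String) :
    is_meaningless_alt clause = if List.Pairwise NoClash clause then 0 else 1 := by
  unfold is_meaningless_alt
  rw [bLoop_eq clause PySem.Set.empty PySem.Set.empty (by intro z; simp [PySem.Set.empty])]
  exact if_congr (and_iff_left (by simp [PySem.Set.empty])) rfl rfl

/-- The pair-of-indices condition of A is exactly "not pairwise clash-free". -/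
lemma pair_iff (clause : List String) :
    (∃ i < clause.length, ∃ j < clause.length,
        i ≠ j ∧ Clash (clause.getD i "") (clause.getD j ""))
      ↔ ¬ List.Pairwise NoClash clause := by
  constructor
  · rintro ⟨i, hi, j, hj, hij, hc⟩ hpw
    rw [List.getD_eq_getElem clause "" hi, List.getD_eq_getElem clause "" hj] at hc
    rw [List.pairwise_iff_getElem] at hpw
    rcases Nat.lt_or_ge i j with h | h
    · exact hpw i j hi hj h hc
    · exact hpw j i hj hi (by omega) (Clash_symm hc)
  · intro h
    by_contra hne
    apply h
    rw [List.pairwise_iff_getElem]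
    intro i j hi hj hij hc
    refine hne ⟨i, hi, j, hj, by omega, ?_⟩
    rwa [List.getD_eq_getElem clause "" hi, List.getD_eq_getElem clause "" hj]

-- ===== VERDICT (by name: the statement is the Claim_ definition above) =====
theorem is_meaningless_spec : Claim_equal_is_meaningless := by
  intro clause _
  unfold Spec_is_meaningless
  rw [is_meaningless_eq, is_meaningless_alt_eq]
  by_cases hp : List.Pairwise NoClash clause
  · rw [if_neg (fun hc => (pair_iff clause).mp hc hp), if_pos hp]
  · rw [if_pos ((pair_iff clause).mpr hp), if_neg hp]
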